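-- pv_equiv track=rewrite | github.com/Ksenia-alex/Algo_labs | lab5/Task5/src/task5.py | parallel_task_processing
-- ===== SOURCE A (Python) =====
-- def parallel_task_processing(count_threads: int, count_task: int, times: list[int]) -> list[tuple]:
--     """
--     функция для работы с планировщиком заданий
--     :param count_threads: int
--     :param count_task: int
--     :param times: list[int]
--     :return: list[tuple]
--     """
--     free_threads = [(0, i) for i in range(count_threads)]
--     result = []
--     for t in range(count_task):
--         task_time = times[t]
--         free_threads.sort()
--         free_time, thread_id = free_threads.pop(0)
--         start_time = free_time
--         end_time = start_time + task_time
--         free_threads.append((end_time, thread_id))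
--         result.append((thread_id, start_time))
--
--     return result
-- ===== SOURCE B (Python) =====
-- def parallel_task_processing(count_threads: int, count_task: int, times: list[int]) -> list[tuple]:
--     """Flat array of per-thread free times indexed by thread id; each task is
--     assigned by a linear argmin scan (first minimum = smallest id among ties)
--     and the chosen slot is updated in place -- no list of pairs, no sorting,
--     no pop/append queue shuffling."""
--     free = [0] * count_threads
--     result = []
--     for t in range(count_task):
--         best = 0
--         for i in range(1, count_threads):
--             if free[i] < free[best]:
--                 best = i
--         result.append((best, free[best]))
--         free[best] = free[best] + times[t]
--     return result
-- ===== Notes on version B (the rewrite author's own statement) =====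
-- stated objective: alternative
-- what changed: B replaces A's list of (free_time, id) pairs that is re-sorted and popped/appended every iteration by a flat array of free times indexed by thread id, picking each task's thread with a linear first-argmin scan and updating that slot in place.
import Mathlib
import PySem

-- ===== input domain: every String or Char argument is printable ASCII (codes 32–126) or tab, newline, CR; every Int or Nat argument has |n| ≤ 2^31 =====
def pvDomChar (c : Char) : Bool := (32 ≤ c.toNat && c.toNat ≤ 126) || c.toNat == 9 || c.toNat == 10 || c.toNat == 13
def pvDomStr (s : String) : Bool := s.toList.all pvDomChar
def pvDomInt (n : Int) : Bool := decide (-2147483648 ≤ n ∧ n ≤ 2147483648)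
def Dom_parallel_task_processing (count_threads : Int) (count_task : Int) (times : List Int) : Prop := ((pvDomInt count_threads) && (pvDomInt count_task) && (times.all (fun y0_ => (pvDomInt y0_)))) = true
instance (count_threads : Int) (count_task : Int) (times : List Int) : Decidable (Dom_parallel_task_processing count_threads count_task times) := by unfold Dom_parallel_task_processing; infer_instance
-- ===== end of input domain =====

-- B replaces A's sorted pair-list queue by a flat per-thread free-time array with a
-- first-argmin scan and in-place update; the returned assignment list is proved equal.

-- ===== PORT A =====
-- Python tuple comparison (free_time, thread_id) is lexicographic: key into Int ×ₗ Int.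
def pvKey (p : Int × Int) : Int ×ₗ Int := toLex p

def parallel_task_processing (count_threads : Int) (count_task : Int) (times : List Int) : List (Int × Int) :=
  let free0 : List (Int × Int) := (PySem.List.pyRange 0 count_threads 1).map (fun i => ((0 : Int), i))
  let fin := (PySem.List.pyRange 0 count_task 1).foldl
    (fun (st : List (Int × Int) × List (Int × Int)) (t : Int) =>
      let task_time := PySem.List.pyGetD times t 0      -- times[t]; in range under Pre_
      match PySem.List.sorted st.1 pvKey false with     -- free_threads.sort(); pop(0)
      | [] => st                                        -- Python raises IndexError here; Pre_ excludes
      | (free_time, thread_id) :: rest =>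
          (rest ++ [(free_time + task_time, thread_id)], st.2 ++ [(thread_id, free_time)]))
    (free0, [])
  fin.2

-- ===== PORT B =====
def parallel_task_processing_alt (count_threads : Int) (count_task : Int) (times : List Int) : List (Int × Int) :=
  let free0 : List Int := List.replicate count_threads.toNat 0   -- [0] * count_threads ([] if ≤ 0, as in Python)
  let fin := (PySem.List.pyRange 0 count_task 1).foldl
    (fun (st : List Int × List (Int × Int)) (t : Int) =>
      let free := st.1
      -- best = first-argmin scan over range(1, count_threads)
      let best := (PySem.List.pyRange 1 count_threads 1).foldl
        (fun best i =>
          if PySem.List.pyGetD free i 0 < PySem.List.pyGetD free best 0 then i else best) 0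
      -- free[best] raises in Python when free = []; Pre_ excludes; pyGetD/pySetD are the exact ports in range
      (PySem.List.pySetD free best (PySem.List.pyGetD free best 0 + PySem.List.pyGetD times t 0),
       st.2 ++ [(best, PySem.List.pyGetD free best 0)]))
    (free0, [])
  fin.2

-- ===== PRECONDITION & SPEC =====
-- Pre_: exactly where Python A returns normally: every processed task index has a time entry
-- (else times[t] raises IndexError) and, if any task is processed, at least one thread exists
-- (else pop(0) raises IndexError).
def Pre_parallel_task_processing (count_threads : Int) (count_task : Int) (times : List Int) : Prop :=
  count_task ≤ (times.length : Int) ∧ (count_task ≤ 0 ∨ 0 < count_threads)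
instance (count_threads : Int) (count_task : Int) (times : List Int) : Decidable (Pre_parallel_task_processing count_threads count_task times) := by unfold Pre_parallel_task_processing; infer_instance

def pvWitness_parallel_task_processing : Int × Int × List Int := (2, 3, [5, 2, 4])

def Spec_parallel_task_processing (count_threads : Int) (count_task : Int) (times : List Int) (out : List (Int × Int)) : Prop := out = parallel_task_processing_alt count_threads count_task times
instance (count_threads : Int) (count_task : Int) (times : List Int) (out : List (Int × Int)) : Decidable (Spec_parallel_task_processing count_threads count_task times out) := by unfold Spec_parallel_task_processing; infer_instance

-- ===== CLAIM (what is proved, stated in full; the proofs are below) =====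
def Claim_equal_parallel_task_processing : Prop := ∀ (count_threads : Int) (count_task : Int) (times : List Int), Dom_parallel_task_processing count_threads count_task times → Pre_parallel_task_processing count_threads count_task times → Spec_parallel_task_processing count_threads count_task times (parallel_task_processing count_threads count_task times)

-- ===== LEMMAS AND PROOFS =====

-- (value, id) pairs of B's array, ids starting at k: the abstract content of A's queue
def pvPairs : List Int → Int → List (Int × Int)
  | [], _ => []
  | a :: l, k => (a, k) :: pvPairs l (k + 1)

theorem pvPairs_mem (free : List Int) : ∀ (k : Int) (p : Int × Int),
    p ∈ pvPairs free k ↔ ∃ j : Nat, ∃ h : j < free.length, p = (free[j], k + j) := by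
  induction free with
  | nil => intro k p; simp [pvPairs]
  | cons a l ih =>
      intro k p
      simp only [pvPairs, List.mem_cons, ih]
      constructor
      · rintro (rfl | ⟨j, hj, rfl⟩)
        · exact ⟨0, by simp, by simp⟩
        · exact ⟨j + 1, by simpa using hj, by rw [List.getElem_cons_succ]; push_cast; ring_nf⟩
      · rintro ⟨j, hj, rfl⟩
        cases j with
        | zero => left; simp
        | succ j =>
            right; exact ⟨j, by simpa using hj, by rw [List.getElem_cons_succ]; push_cast; ring_nf⟩

-- invariant of the first-argmin scan: best index so far, minimal on [0, m), strictly below earlier indices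
def pvInv (free : List Int) (m b : Int) : Prop :=
  0 ≤ b ∧ b < m ∧
  (∀ i : Int, 0 ≤ i → i < m → PySem.List.pyGetD free b 0 ≤ PySem.List.pyGetD free i 0) ∧
  (∀ i : Int, 0 ≤ i → i < b → PySem.List.pyGetD free b 0 < PySem.List.pyGetD free i 0)

theorem pvArgmin_inv (free : List Int) (n : Int) :
    ∀ (k : Nat) (m b0 : Int), (n - m).toNat = k → m ≤ n → pvInv free m b0 →
    pvInv free n ((PySem.List.pyRange m n 1).foldl
      (fun best i =>
        if PySem.List.pyGetD free i 0 < PySem.List.pyGetD free best 0 then i else best) b0) := by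
  intro k
  induction k with
  | zero =>
      intro m b0 hk hm hinv
      have hnm : n = m := by omega
      subst hnm
      rw [PySem.List.pyRange_one_eq_nil (le_refl n)]
      exact hinv
  | succ k ih =>
      intro m b0 hk hm hinv
      have hlt : m < n := by omega
      rw [PySem.List.pyRange_one_cons hlt]
      simp only [List.foldl_cons]
      apply ih (m + 1) _ (by omega) (by omega)
      obtain ⟨hb0, hbm, hmin, hstrict⟩ := hinv
      by_cases hc : PySem.List.pyGetD free m 0 < PySem.List.pyGetD free b0 0
      · rw [if_pos hc]
        refine ⟨by omega, by omega, ?_, ?_⟩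
        · intro i h0 hi
          by_cases him : i < m
          · exact le_of_lt (lt_of_lt_of_le hc (hmin i h0 him))
          · have : i = m := by omega
            subst this; exact le_refl _
        · intro i h0 hi
          exact lt_of_lt_of_le hc (hmin i h0 (by omega))
      · rw [if_neg hc]
        refine ⟨hb0, by omega, ?_, hstrict⟩
        intro i h0 hi
        by_cases him : i < m
        · exact hmin i h0 him
        · have : i = m := by omega
          subst this; exact le_of_not_gt hc

theorem pvGetD_eq (free : List Int) (j : Nat) (hj : j < free.length) :
    PySem.List.pyGetD free (j : Int) 0 = free[j] := by
  rw [PySem.List.pyGetD_natCast, List.getD_eq_getElem _ _ hj]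

-- head of A's sorted queue is B's first-argmin entry; the tail is a rearrangement of the rest
theorem pv_sorted_head (free : List Int) (P : List (Int × Int)) (b : Int)
    (hperm : P.Perm (pvPairs free 0)) (hinv : pvInv free (free.length : Int) b) :
    ∃ rest, PySem.List.sorted P pvKey false = (PySem.List.pyGetD free b 0, b) :: rest ∧
      rest.Perm ((pvPairs free 0).erase (PySem.List.pyGetD free b 0, b)) := by
  obtain ⟨hb0, hbn, hmin, hstrict⟩ := hinv
  have hblen : b.toNat < free.length := by omega
  have hbcast : ((b.toNat : Nat) : Int) = b := by omega
  have hgb : PySem.List.pyGetD free b 0 = free[b.toNat] := by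
    have h1 := pvGetD_eq free b.toNat hblen
    rwa [hbcast] at h1
  have hbmem : (PySem.List.pyGetD free b 0, b) ∈ pvPairs free 0 := by
    rw [pvPairs_mem]
    exact ⟨b.toNat, hblen, by rw [hgb, hbcast]; simp⟩
  have hsp : (PySem.List.sorted P pvKey false).Perm (pvPairs free 0) :=
    (PySem.List.sorted_perm P pvKey false).trans hperm
  cases hs : PySem.List.sorted P pvKey false with
  | nil =>
      rw [hs] at hsp
      have : (PySem.List.pyGetD free b 0, b) ∈ ([] : List (Int × Int)) :=
        hsp.symm.mem_iff.mp hbmem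
      simp at this
  | cons h rest =>
      rw [hs] at hsp
      have hhmem : h ∈ pvPairs free 0 := hsp.mem_iff.mp (List.mem_cons_self)
      obtain ⟨j, hj, hh⟩ := (pvPairs_mem free 0 h).mp hhmem
      have hle : pvKey h ≤ pvKey (PySem.List.pyGetD free b 0, b) := by
        have := PySem.List.key_head_sorted_le P pvKey hs
        exact this _ (hperm.symm.mem_iff.mp hbmem)
      have hgj : PySem.List.pyGetD free (j : Int) 0 = free[j] := pvGetD_eq free j hj
      have hminj : PySem.List.pyGetD free b 0 ≤ free[j] := by
        rw [← hgj]; exact hmin _ (by positivity) (by omega)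
      have hlex : free[j] < PySem.List.pyGetD free b 0 ∨
          (free[j] = PySem.List.pyGetD free b 0 ∧ (0 + (j : Int)) ≤ b) := by
        have := hle
        rw [hh] at this
        simpa [pvKey, Prod.Lex.toLex_le_toLex] using this
      have hjb : (0 + (j : Int)) = b := by
        rcases hlex with hlt | ⟨heq, hjle⟩
        · omega
        · by_contra hne
          have hjlt : (j : Int) < b := by omega
          have := hstrict (j : Int) (by positivity) hjlt
          rw [hgj] at this; omega
      have hfj : free[j] = PySem.List.pyGetD free b 0 := by
        rcases hlex with hlt | ⟨heq, _⟩
        · omega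
        · exact heq
      have hheq : h = (PySem.List.pyGetD free b 0, b) := by
        rw [hh, hfj, hjb]
      refine ⟨rest, by rw [hheq], ?_⟩
      exact (List.cons_perm_iff_perm_erase.mp (hheq ▸ hsp)).2

-- updating slot j rearranges the pair multiset: erase the old entry, add the new one
theorem pvPairs_set (v : Int) : ∀ (free : List Int) (j : Nat) (k : Int) (hj : j < free.length),
    (pvPairs (free.set j v) k).Perm
      ((v, k + j) :: (pvPairs free k).erase (free[j]'hj, k + j)) := by
  intro free
  induction free with
  | nil => intro j k hj; simp at hj
  | cons a l ih =>
      intro j k hj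
      cases j with
      | zero =>
          simp only [List.set_cons_zero, pvPairs, List.getElem_cons_zero, Nat.cast_zero, add_zero]
          rw [List.erase_cons_head]
      | succ j =>
          simp only [List.set_cons_succ, pvPairs, List.getElem_cons_succ]
          have hjl : j < l.length := by simpa using hj
          have hne : ¬ (((a, k) : Int × Int) == (l[j], k + ((j + 1 : Nat) : Int))) = true := by
            simp only [beq_iff_eq, Prod.mk.injEq, not_and]
            intro _; push_cast; omega
          rw [List.erase_cons_tail hne]
          have h1 := ih j (k + 1) hjl
          have hcast : (k + 1) + (j : Int) = k + ((j + 1 : Nat) : Int) := by push_cast; ring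
          have hswap : ((a, k) :: (v, (k+1) + (j:Int)) :: (pvPairs l (k+1)).erase (l[j], (k+1) + (j:Int))).Perm
              ((v, (k+1) + (j:Int)) :: (a, k) :: (pvPairs l (k+1)).erase (l[j], (k+1) + (j:Int))) :=
            List.Perm.swap _ _ _
          have hfin : ((v, (k+1) + (j:Int)) :: (a, k) :: (pvPairs l (k+1)).erase (l[j], (k+1) + (j:Int)))
              = ((v, k + ((j+1:Nat):Int)) :: (a, k) :: (pvPairs l (k+1)).erase (l[j], k + ((j+1:Nat):Int))) := by
            rw [hcast]
          exact ((h1.cons _).trans hswap).trans (hfin ▸ List.Perm.refl _)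

-- B's initial array abstracts to A's initial queue
theorem pvPairs_replicate : ∀ (m : Nat) (k : Int),
    pvPairs (List.replicate m (0 : Int)) k
      = (List.range m).map (fun j : Nat => ((0 : Int), k + (j : Int))) := by
  intro m
  induction m with
  | zero => intro k; simp [pvPairs]
  | succ m ih =>
      intro k
      rw [List.replicate_succ, List.range_succ_eq_map]
      simp only [pvPairs, List.map_cons, List.map_map]
      rw [ih (k + 1)]
      refine List.cons_eq_cons.mpr ⟨by simp, ?_⟩
      apply List.map_congr_left
      intro j hj
      simp [Function.comp]
      ring

-- the main loop invariant: A's fold on the pair queue = B's fold on the flat array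
theorem pv_loop (times : List Int) (n : Int) (hn : 0 < n) :
    ∀ (ts : List Int) (free : List Int) (P res : List (Int × Int)),
      (free.length : Int) = n → P.Perm (pvPairs free 0) →
      (ts.foldl
        (fun (st : List (Int × Int) × List (Int × Int)) (t : Int) =>
          let task_time := PySem.List.pyGetD times t 0
          match PySem.List.sorted st.1 pvKey false with
          | [] => st
          | (free_time, thread_id) :: rest =>
              (rest ++ [(free_time + task_time, thread_id)], st.2 ++ [(thread_id, free_time)]))
        (P, res)).2
      =
      (ts.foldl
        (fun (st : List Int × List (Int × Int)) (t : Int) =>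
          let free := st.1
          let best := (PySem.List.pyRange 1 n 1).foldl
            (fun best i =>
              if PySem.List.pyGetD free i 0 < PySem.List.pyGetD free best 0 then i else best) 0
          (PySem.List.pySetD free best (PySem.List.pyGetD free best 0 + PySem.List.pyGetD times t 0),
           st.2 ++ [(best, PySem.List.pyGetD free best 0)]))
        (free, res)).2 := by
  intro ts
  induction ts with
  | nil => intro free P res _ _; simp
  | cons t ts ih =>
      intro free P res hlen hperm
      simp only [List.foldl_cons]
      -- the argmin of B's scan
      have hinv1 : pvInv free 1 0 := by
        refine ⟨le_refl 0, by omega, ?_, ?_⟩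
        · intro i h0 h1
          have : i = 0 := by omega
          subst this; exact le_refl _
        · intro i h0 hi; omega
      have hinvn := pvArgmin_inv free n ((n - 1).toNat) 1 0 rfl (by omega) hinv1
      set b := (PySem.List.pyRange 1 n 1).foldl
          (fun best i =>
            if PySem.List.pyGetD free i 0 < PySem.List.pyGetD free best 0 then i else best) 0 with hbdef
      have hinvlen : pvInv free (free.length : Int) b := by rw [hlen]; exact hinvn
      obtain ⟨hb0, hbn, hmin, hstrict⟩ := hinvlen
      have hblen : b.toNat < free.length := by omega
      have hbcast : ((b.toNat : Nat) : Int) = b := by omega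
      have hgb : PySem.List.pyGetD free b 0 = free[b.toNat] := by
        have h1 := pvGetD_eq free b.toNat hblen
        rwa [hbcast] at h1
      obtain ⟨rest, hs, hrest⟩ := pv_sorted_head free P b hperm ⟨hb0, hbn, hmin, hstrict⟩
      simp only [hs]
      rw [show PySem.List.pySetD free b (PySem.List.pyGetD free b 0 + PySem.List.pyGetD times t 0)
            = free.set b.toNat (PySem.List.pyGetD free b 0 + PySem.List.pyGetD times t 0) from
          PySem.List.pySetD_of_nonneg free (PySem.List.pyGetD free b 0 + PySem.List.pyGetD times t 0) hb0]
      set v := PySem.List.pyGetD free b 0 + PySem.List.pyGetD times t 0 with hvdef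
      have hlen' : (((free.set b.toNat v).length : Nat) : Int) = n := by
        rw [List.length_set]; exact hlen
      have hperm' : (rest ++ [(v, b)]).Perm (pvPairs (free.set b.toNat v) 0) := by
        have hset := pvPairs_set v free b.toNat 0 hblen
        have hcast0 : (0 : Int) + (b.toNat : Int) = b := by omega
        rw [hcast0, ← hgb] at hset
        exact ((List.perm_append_singleton (v, b) rest).trans (hrest.cons (v, b))).trans hset.symm
      exact ih (free.set b.toNat v) (rest ++ [(v, b)]) (res ++ [(b, PySem.List.pyGetD free b 0)]) hlen' hperm'

-- ===== VERDICT (by name: the statement is the Claim_ definition above) =====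
theorem parallel_task_processing_spec : Claim_equal_parallel_task_processing := by
  intro count_threads count_task times hdom hpre
  obtain ⟨hlen, hcase⟩ := hpre
  unfold Spec_parallel_task_processing parallel_task_processing parallel_task_processing_alt
  by_cases h0 : count_task ≤ 0
  · rw [PySem.List.pyRange_one_eq_nil h0]
    simp
  · have hth : 0 < count_threads := hcase.resolve_left h0
    have hfree0len : (((List.replicate count_threads.toNat (0 : Int)).length : Nat) : Int) = count_threads := by
      rw [List.length_replicate]; omega
    have hperm0 : ((PySem.List.pyRange 0 count_threads 1).map (fun i => ((0 : Int), i))).Perm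
        (pvPairs (List.replicate count_threads.toNat 0) 0) := by
      rw [pvPairs_replicate, PySem.List.pyRange_one, List.map_map]
      have : ((fun i => ((0 : Int), i)) ∘ fun k : Nat => (0 : Int) + k)
          = fun j : Nat => ((0 : Int), (0 : Int) + j) := by funext j; simp
      rw [this]
      norm_num
    exact pv_loop times count_threads hth (PySem.List.pyRange 0 count_task 1)
      (List.replicate count_threads.toNat 0)
      ((PySem.List.pyRange 0 count_threads 1).map (fun i => ((0 : Int), i))) [] hfree0len hperm0
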